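-- pv_equiv track=rewrite | github.com/SatishGollu/Leetcode_Coding_Solutions | 11. Trees/test.py | findMaxDiv
-- ===== SOURCE A (Python) =====
-- def maxSubarray(s, ch1, ch2):
--     """Find the largest sum of any contiguous subarray."""
--     """From https://en.wikipedia.org/wiki/Maximum_subarray_problem"""
--     best_sum = 0
--     current_sum = 0
--     for x in s:
--         if x == ch1:
--             x = 1
--         elif x == ch2:
--             x = -1
--         else:
--             x = 0
--         current_sum = max(0, current_sum + x)
--         best_sum = max(best_sum, current_sum)
--     return best_sum
--
-- def findMaxDiv(s):
--     '''Algo from https://discuss.codechef.com/t/help-coding-strings/99427/4'''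
--     maxDiv = 0
--     for ch1 in range (ord('a'),ord('z')):
--         for ch2 in range (ord('a'),ord('z')):
--             if chr(ch1) == chr(ch2):
--                 continue
--
--             curDiv = maxSubarray(s, chr(ch1), chr(ch2))
--             if curDiv > maxDiv:
--                 maxDiv = curDiv
--
--     return maxDiv
-- ===== SOURCE B (Python) =====
-- def findMaxDiv(s):
--     best = 0
--     for c1 in range(ord('a'), ord('z')):
--         for c2 in range(ord('a'), ord('z')):
--             if c1 == c2:
--                 continue
--             ch1, ch2 = chr(c1), chr(c2)
--             pref = 0
--             minp = 0
--             b = 0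
--             for x in s:
--                 pref += 1 if x == ch1 else (-1 if x == ch2 else 0)
--                 if pref - minp > b:
--                     b = pref - minp
--                 if pref < minp:
--                     minp = pref
--             if b > best:
--                 best = b
--     return best
-- ===== Notes on version B (the rewrite author's own statement) =====
-- stated objective: alternative
-- what changed: The inner Kadane reset recurrence (current_sum = max(0, current_sum + x)) is replaced by a prefix-sum/running-minimum formulation: one pass per letter pair keeps the running prefix total and the minimum prefix seen, and the best subarray sum is the max prefix difference.
import Mathlib
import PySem

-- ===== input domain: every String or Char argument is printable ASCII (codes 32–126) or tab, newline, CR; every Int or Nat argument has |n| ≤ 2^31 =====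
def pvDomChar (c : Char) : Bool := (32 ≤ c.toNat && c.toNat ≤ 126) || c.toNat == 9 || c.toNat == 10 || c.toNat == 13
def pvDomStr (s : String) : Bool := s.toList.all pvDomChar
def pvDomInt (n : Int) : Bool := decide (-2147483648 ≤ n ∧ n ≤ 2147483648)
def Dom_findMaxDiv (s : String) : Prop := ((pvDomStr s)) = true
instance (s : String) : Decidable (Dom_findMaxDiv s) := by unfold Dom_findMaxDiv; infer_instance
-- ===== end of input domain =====

-- B replaces the inner Kadane reset recurrence with a prefix-sum / running-minimum
-- scan (alternative formulation, same asymptotic cost); proved to return A's exact value.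

-- ===== PORT A =====
-- helper maxSubarray: Kadane with reset, allowing the empty subarray
def kadaneStep (ch1 ch2 : Char) (st : Int × Int) (x : Char) : Int × Int :=
  let v : Int := if x = ch1 then 1 else if x = ch2 then -1 else 0
  let cur := max 0 (st.2 + v)
  (max st.1 cur, cur)

def maxSubarray (s : String) (ch1 ch2 : Char) : Int :=
  (s.toList.foldl (kadaneStep ch1 ch2) (0, 0)).1

def findMaxDiv (s : String) : Int :=
  (PySem.List.pyRange 97 122 1).foldl (fun maxDiv c1 =>
    (PySem.List.pyRange 97 122 1).foldl (fun maxDiv c2 =>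
      if Char.ofNat c1.toNat = Char.ofNat c2.toNat then maxDiv
      else
        let curDiv := maxSubarray s (Char.ofNat c1.toNat) (Char.ofNat c2.toNat)
        if curDiv > maxDiv then curDiv else maxDiv) maxDiv) 0

-- ===== PORT B =====
-- per-pair scan: state = (best, pref, minp); best via prefix differences
def prefStep (ch1 ch2 : Char) (st : Int × Int × Int) (x : Char) : Int × Int × Int :=
  let pref := st.2.1 + (if x = ch1 then 1 else if x = ch2 then -1 else 0)
  let b := if pref - st.2.2 > st.1 then pref - st.2.2 else st.1
  (b, pref, if pref < st.2.2 then pref else st.2.2)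

def findMaxDiv_alt (s : String) : Int :=
  (PySem.List.pyRange 97 122 1).foldl (fun best c1 =>
    (PySem.List.pyRange 97 122 1).foldl (fun best c2 =>
      if c1 = c2 then best
      else
        let b := (s.toList.foldl (prefStep (Char.ofNat c1.toNat) (Char.ofNat c2.toNat)) (0, 0, 0)).1
        if b > best then b else best) best) 0

-- ===== PRECONDITION & SPEC =====
def Spec_findMaxDiv (s : String) (out : Int) : Prop := out = findMaxDiv_alt s
instance (s : String) (out : Int) : Decidable (Spec_findMaxDiv s out) := by unfold Spec_findMaxDiv; infer_instance

-- ===== CLAIM (what is proved, stated in full; the proofs are below) =====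
def Claim_equal_findMaxDiv : Prop := ∀ (s : String), Dom_findMaxDiv s → Spec_findMaxDiv s (findMaxDiv s)

-- ===== LEMMAS AND PROOFS =====

theorem toNat_ofNat_small (n : Nat) (h : n < 128) : (Char.ofNat n).toNat = n := by
  unfold Char.ofNat Char.toNat
  rw [dif_pos (Or.inl (by omega) : Nat.isValidChar n)]
  simp [Char.ofNatAux]

-- invariant linking Kadane's state to the prefix/min-prefix state
theorem kadane_eq_pref (c1 c2 : Char) :
    ∀ (l : List Char) (best cur pref minp : Int), 0 ≤ best → cur = pref - minp →
      (l.foldl (kadaneStep c1 c2) (best, cur)).1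
        = (l.foldl (prefStep c1 c2) (best, pref, minp)).1 := by
  intro l
  induction l with
  | nil => intro best cur pref minp _ _; rfl
  | cons x xs ih =>
      intro best cur pref minp hb hc
      simp only [List.foldl_cons, kadaneStep, prefStep]
      have hbest : max best (max 0 (cur + (if x = c1 then 1 else if x = c2 then -1 else 0)))
          = (if (pref + (if x = c1 then 1 else if x = c2 then -1 else 0)) - minp > best
             then (pref + (if x = c1 then 1 else if x = c2 then -1 else 0)) - minp else best) := by
        split_ifs <;> omega
      rw [hbest]
      apply ih
      · split_ifs <;> omega
      · split_ifs <;> omega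

theorem ms_eq (s : String) (c1 c2 : Char) :
    maxSubarray s c1 c2 = (s.toList.foldl (prefStep c1 c2) (0, 0, 0)).1 :=
  kadane_eq_pref c1 c2 s.toList 0 0 0 0 le_rfl (by ring)

-- same continue condition: chr(c1) == chr(c2) iff c1 == c2 on the range 97..121
theorem chr_eq_iff (c1 c2 : Int) (h1 : c1 ∈ PySem.List.pyRange 97 122 1)
    (h2 : c2 ∈ PySem.List.pyRange 97 122 1) :
    (Char.ofNat c1.toNat = Char.ofNat c2.toNat) = (c1 = c2) := by
  rw [PySem.List.mem_pyRange_one] at h1 h2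
  simp only [eq_iff_iff]
  constructor
  · intro h
    have : c1.toNat = c2.toNat := by
      have hv : (Char.ofNat c1.toNat).toNat = (Char.ofNat c2.toNat).toNat := by rw [h]
      rwa [toNat_ofNat_small c1.toNat (by omega), toNat_ofNat_small c2.toNat (by omega)] at hv
    omega
  · intro h; rw [h]

-- ===== VERDICT (by name: the statement is the Claim_ definition above) =====
theorem findMaxDiv_spec : Claim_equal_findMaxDiv := by
  intro s _
  unfold Spec_findMaxDiv findMaxDiv findMaxDiv_alt
  apply PySem.List.foldl_congr_mem
  intro best c1 h1
  apply PySem.List.foldl_congr_mem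
  intro best2 c2 h2
  by_cases h : c1 = c2
  · subst h; simp
  · rw [if_neg (fun hc => h ((chr_eq_iff c1 c2 h1 h2) ▸ hc)), if_neg h, ms_eq]
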